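-- pv_equiv track=rewrite | github.com/7ayushgupta/dev-tutorials | algorithms/binarysearch/partitionString.py | solve
-- ===== SOURCE A (Python) =====
-- def solve(S):
--     if (S==""):
--         return []
--     start = {}
--     end = {}
--     sort = []
--     for i in range(len(S)):
--         if S[i] not in start:
--             start[S[i]] = i
--             sort.append(S[i])
--         end[S[i]] = i
--     i = j = 0
--     res = []
--     for c in sort:
--         if start[c] <= j:
--             j = max(j, end[c])
--         else:
--             res.append(j - i + 1)
--             i = start[c]
--             j = end[c]
--     res.append(j - i + 1)
--     return res
-- ===== SOURCE B (Python) =====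
-- def solve(S):
--     if S == "":
--         return []
--     last = {}
--     for i, c in enumerate(S):
--         last[c] = i
--     res = []
--     start = 0
--     end = 0
--     for i, c in enumerate(S):
--         end = max(end, last[c])
--         if i == end:
--             res.append(end - start + 1)
--             start = i + 1
--     return res
-- ===== Notes on version B (the rewrite author's own statement) =====
-- stated objective: simpler
-- what changed: Replaces A's first/last-occurrence dicts plus an interval-merge pass over the list of distinct characters with a single last-occurrence table and one positional pass that cuts whenever the running max of last occurrences equals the current index.
import Mathlib
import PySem

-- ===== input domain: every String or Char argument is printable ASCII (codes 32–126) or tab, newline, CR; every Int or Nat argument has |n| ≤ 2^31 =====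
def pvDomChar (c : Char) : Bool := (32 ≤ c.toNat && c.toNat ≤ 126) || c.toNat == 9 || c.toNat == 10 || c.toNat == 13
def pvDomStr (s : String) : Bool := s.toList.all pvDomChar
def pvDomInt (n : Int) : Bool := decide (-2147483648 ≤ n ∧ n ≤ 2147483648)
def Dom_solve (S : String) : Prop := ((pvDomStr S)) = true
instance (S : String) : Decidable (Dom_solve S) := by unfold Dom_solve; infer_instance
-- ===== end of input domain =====

-- B replaces A's first/last dicts + distinct-char interval merge by one last-occurrence table
-- and a single positional cut pass (objective: simpler).

-- ===== PORT A =====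
-- 'S == ""' is ported as 'S.toList = []' (exact: a string is empty iff it has no characters);
-- S[i] for i produced by range(len(S)) is ported via pyGetD on the char list (exact: i is in range).
def solve (S : String) : List Int :=
  let l := S.toList
  if l = [] then []
  else
    let p1 := (PySem.List.pyRange 0 (l.length : Int) 1).foldl
      (fun (st : PySem.Dict Char Int × PySem.Dict Char Int × List Char) i =>
        let c := PySem.List.pyGetD l i ' '
        if st.1.contains c = false then
          (st.1.insert c i, st.2.1.insert c i, st.2.2 ++ [c])
        else
          (st.1, st.2.1.insert c i, st.2.2))
      (PySem.Dict.empty, PySem.Dict.empty, [])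
    -- start[c] / end[c]: the keys are always present, so getD with default 0 is exact
    let r := p1.2.2.foldl
      (fun (st : Int × Int × List Int) c =>
        if p1.1.getD c 0 ≤ st.2.1 then
          (st.1, max st.2.1 (p1.2.1.getD c 0), st.2.2)
        else
          (p1.1.getD c 0, p1.2.1.getD c 0, st.2.2 ++ [st.2.1 - st.1 + 1]))
      (0, 0, [])
    r.2.2 ++ [r.2.1 - r.1 + 1]

-- ===== PORT B =====
def solve_alt (S : String) : List Int :=
  let l := S.toList
  if l = [] then []
  else
    let lastD := (PySem.List.enumerate l).foldl
      (fun (d : PySem.Dict Char Int) ic => d.insert ic.2 ic.1) PySem.Dict.empty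
    -- last[c]: the key is always present, so getD with default 0 is exact
    let r := (PySem.List.enumerate l).foldl
      (fun (st : List Int × Int × Int) ic =>
        let en := max st.2.2 (lastD.getD ic.2 0)
        if ic.1 = en then (st.1 ++ [en - st.2.1 + 1], ic.1 + 1, en)
        else (st.1, st.2.1, en))
      ([], 0, 0)
    r.1

-- ===== PRECONDITION & SPEC =====
def Spec_solve (S : String) (out : List Int) : Prop := out = solve_alt S
instance (S : String) (out : List Int) : Decidable (Spec_solve S out) := by unfold Spec_solve; infer_instance

-- ===== CLAIM (what is proved, stated in full; the proofs are below) =====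
def Claim_equal_solve : Prop := ∀ (S : String), Dom_solve S → Spec_solve S (solve S)

-- ===== LEMMAS AND PROOFS =====

def pvLast? (l : List Char) (c : Char) : Option Nat :=
  l.zipIdx.foldl (fun acc p => if p.1 = c then some p.2 else acc) none

theorem pvLast?_append (t : List Char) (x c : Char) :
    pvLast? (t ++ [x]) c = if x = c then some t.length else pvLast? t c := by
  unfold pvLast?
  rw [List.zipIdx_append, List.foldl_append]
  simp

theorem pvLast?_ge (l : List Char) (c : Char) (k : Nat) (hk : k < l.length) (hc : l[k] = c) :
    ∃ m, pvLast? l c = some m ∧ k ≤ m := by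
  induction l using List.reverseRecOn with
  | nil => simp at hk
  | append_singleton t x ih =>
    rw [pvLast?_append]
    by_cases hx : x = c
    · exact ⟨t.length, by simp [hx], by simp at hk; omega⟩
    · simp only [hx, if_false]
      have hk' : k < t.length := by
        rcases Nat.lt_or_ge k t.length with h | h
        · exact h
        · exfalso; apply hx
          have : k = t.length := by simp at hk; omega
          subst this
          simpa using hc
      exact ih hk' (by simpa [List.getElem_append_left hk'] using hc)

theorem pvLast?_lt (l : List Char) (c : Char) (m : Nat) (h : pvLast? l c = some m) :
    m < l.length := by
  induction l using List.reverseRecOn with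
  | nil => simp [pvLast?] at h
  | append_singleton t x ih =>
    rw [pvLast?_append] at h
    by_cases hx : x = c
    · simp [hx] at h; simp <;> omega
    · simp only [hx, if_false] at h
      have := ih h; simp <;> omega

def pvDedup (l : List Char) : List Char :=
  l.foldl (fun acc c => if c ∈ acc then acc else acc ++ [c]) []

theorem pvDedup_mem_aux (l acc : List Char) (c : Char) :
    c ∈ l.foldl (fun acc c => if c ∈ acc then acc else acc ++ [c]) acc ↔ c ∈ acc ∨ c ∈ l := by
  induction l generalizing acc with
  | nil => simp
  | cons a t ih =>
    simp only [List.foldl_cons, ih]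
    by_cases ha : a ∈ acc
    · simp [ha]; constructor
      · rintro (h|h); exacts [Or.inl h, Or.inr (Or.inr h)]
      · rintro (h|h|h); exacts [Or.inl h, Or.inl (h ▸ ha), Or.inr h]
    · simp [ha, List.mem_append]; tauto
theorem pvDedup_mem (l : List Char) (c : Char) : c ∈ pvDedup l ↔ c ∈ l := by
  unfold pvDedup; rw [pvDedup_mem_aux]; simp

theorem pvDedup_append (t : List Char) (x : Char) :
    pvDedup (t ++ [x]) = if x ∈ t then pvDedup t else pvDedup t ++ [x] := by
  unfold pvDedup
  rw [List.foldl_append]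
  simp only [List.foldl_cons, List.foldl_nil]
  have hm : (x ∈ t.foldl (fun acc c => if c ∈ acc then acc else acc ++ [c]) []) ↔ (x ∈ t) := by
    rw [pvDedup_mem_aux]; simp
  by_cases hx : x ∈ t
  · simp [hx, hm.mpr hx]
  · rw [if_neg (fun h => hx (hm.mp h)), if_neg hx]

def pvStep1 (st : PySem.Dict Char Int × PySem.Dict Char Int × List Char) (ic : Int × Char) :
    PySem.Dict Char Int × PySem.Dict Char Int × List Char :=
  if st.1.contains ic.2 = false then (st.1.insert ic.2 ic.1, st.2.1.insert ic.2 ic.1, st.2.2 ++ [ic.2])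
  else (st.1, st.2.1.insert ic.2 ic.1, st.2.2)

theorem pvPass1 (l : List Char) :
    (∀ c, ((PySem.List.enumerate l).foldl pvStep1 (PySem.Dict.empty, PySem.Dict.empty, [])).1.get? c
        = (PySem.List.index? l c).map (fun k => (k : Int)))
    ∧ (∀ c, ((PySem.List.enumerate l).foldl pvStep1 (PySem.Dict.empty, PySem.Dict.empty, [])).2.1.get? c
        = (pvLast? l c).map (fun k => (k : Int)))
    ∧ ((PySem.List.enumerate l).foldl pvStep1 (PySem.Dict.empty, PySem.Dict.empty, [])).2.2 = pvDedup l := by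
  induction l using List.reverseRecOn with
  | nil => refine ⟨fun c => ?_, fun c => ?_, ?_⟩ <;> simp [PySem.List.enumerate, pvLast?, pvDedup, PySem.Dict.get?_empty]
  | append_singleton t x ih =>
    obtain ⟨ihs, ihe, iho⟩ := ih
    have henum : PySem.List.enumerate (t ++ [x]) = PySem.List.enumerate t ++ [((t.length : Int), x)] := by
      rw [PySem.List.enumerate_append]
      simp [PySem.List.enumerate_cons, PySem.List.enumerate_nil]
    rw [henum, List.foldl_append]
    set r := (PySem.List.enumerate t).foldl pvStep1 (PySem.Dict.empty, PySem.Dict.empty, []) with hr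
    have hcont : r.1.contains x = (PySem.List.index? t x).isSome := by
      rw [PySem.Dict.contains_eq_isSome_get?, ihs]
      cases PySem.List.index? t x <;> simp
    by_cases hx : x ∈ t
    · have hsome : (PySem.List.index? t x).isSome := by
        rw [PySem.List.index?_isSome_iff]; exact hx
      have : pvStep1 r ((t.length : Int), x) = (r.1, r.2.1.insert x (t.length : Int), r.2.2) := by
        simp [pvStep1, hcont, hx]
      rw [List.foldl_cons, List.foldl_nil, this]
      refine ⟨fun c => ?_, fun c => ?_, ?_⟩
      · rw [ihs]
        by_cases hc : c ∈ t
        · rw [PySem.List.index?_append_of_mem _ hc]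
        · have h1 : PySem.List.index? t c = none := (PySem.List.index?_eq_none_iff t c).mpr hc
          have h2 : PySem.List.index? (t ++ [x]) c = none := by
            rw [PySem.List.index?_eq_none_iff]
            simp only [List.mem_append, List.mem_singleton]
            rintro (h | rfl); exacts [hc h, hc hx]
          rw [h1, h2]
      · rw [PySem.Dict.get?_insert, ihe, pvLast?_append]
        by_cases hc : c = x
        · subst hc; simp
        · simp [hc, Ne.symm hc]
      · simpa [pvDedup_append, hx] using iho
    · have hnone : PySem.List.index? t x = none := (PySem.List.index?_eq_none_iff t x).mpr hx
      have : pvStep1 r ((t.length : Int), x)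
          = (r.1.insert x (t.length : Int), r.2.1.insert x (t.length : Int), r.2.2 ++ [x]) := by
        simp [pvStep1, hcont, hx]
      rw [List.foldl_cons, List.foldl_nil, this]
      refine ⟨fun c => ?_, fun c => ?_, ?_⟩
      · rw [PySem.Dict.get?_insert, ihs]
        by_cases hc : c = x
        · subst hc
          rw [PySem.List.index?_append_singleton_self t c hx]
          simp
        · have : PySem.List.index? (t ++ [x]) c = PySem.List.index? t c := by
            by_cases hct : c ∈ t
            · exact PySem.List.index?_append_of_mem _ hct
            · rw [(PySem.List.index?_eq_none_iff t c).mpr hct]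
              rw [PySem.List.index?_eq_none_iff]
              simp only [List.mem_append, List.mem_singleton]
              rintro (h | rfl); exacts [hct h, hc rfl]
          rw [this]
          simp [hc]
      · rw [PySem.Dict.get?_insert, ihe, pvLast?_append]
        by_cases hc : c = x
        · subst hc; simp
        · simp [hc, Ne.symm hc]
      · simpa [pvDedup_append, hx] using iho

theorem pvIndex?_eq (l : List Char) (c : Char) (k : Nat) (hk : k < l.length)
    (htk : c ∉ l.take k) (hc : l[k] = c) : PySem.List.index? l c = some k := by
  rw [PySem.List.index?_eq_some_iff]
  refine ⟨l.take k, l.drop (k+1), ?_, by simp [Nat.le_of_lt hk], htk⟩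
  conv_lhs => rw [← List.take_append_drop k l]
  rw [List.drop_eq_getElem_cons hk, hc]

def pvF (l : List Char) (c : Char) : Int := ((PySem.List.index? l c).getD 0 : Nat)
def pvE (l : List Char) (c : Char) : Int := ((pvLast? l c).getD 0 : Nat)

def pvStepA (l : List Char) (st : Int × Int × List Int) (c : Char) : Int × Int × List Int :=
  if pvF l c ≤ st.2.1 then (st.1, max st.2.1 (pvE l c), st.2.2)
  else (pvF l c, pvE l c, st.2.2 ++ [st.2.1 - st.1 + 1])

def pvStepB (l : List Char) (st : List Int × Int × Int) (ic : Int × Char) : List Int × Int × Int :=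
  let en := max st.2.2 (pvE l ic.2)
  if ic.1 = en then (st.1 ++ [en - st.2.1 + 1], ic.1 + 1, en)
  else (st.1, st.2.1, en)

-- pvE at an occurrence is at least that index
theorem pvE_ge (l : List Char) (k : Nat) (hk : k < l.length) : (k : Int) ≤ pvE l l[k] := by
  obtain ⟨m, hm, hkm⟩ := pvLast?_ge l l[k] k hk rfl
  unfold pvE; rw [hm]; simpa using hkm

theorem pvE_lt (l : List Char) (c : Char) (hc : c ∈ l) : pvE l c ≤ (l.length : Int) - 1 := by
  obtain ⟨k, hk, hck⟩ := List.getElem_of_mem hc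
  obtain ⟨m, hm, _⟩ := pvLast?_ge l c k hk hck
  have := pvLast?_lt l c m hm
  unfold pvE; rw [hm]; simp <;> omega

theorem pvE_nonneg (l : List Char) (c : Char) : 0 ≤ pvE l c := by
  unfold pvE; positivity

-- the simultaneous invariant of A's merge loop and B's positional loop
theorem pvMain (l : List Char) (p : Nat) (hp : p < l.length) :
    (let a := (pvDedup (l.take (p+1))).foldl (pvStepA l) (0, 0, []);
     let b := (PySem.List.enumerate (l.take (p+1))).foldl (pvStepB l) ([], 0, 0);
     a.2.1 = b.2.2 ∧
     (∀ c ∈ l.take (p+1), pvE l c ≤ b.2.2) ∧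
     b.2.2 ≤ (l.length : Int) - 1 ∧
     (((p : Int) = b.2.2 ∧ b.2.1 = (p : Int) + 1 ∧ b.1 = a.2.2 ++ [(p : Int) - a.1 + 1])
       ∨ ((p : Int) < b.2.2 ∧ b.2.1 = a.1 ∧ b.1 = a.2.2))) := by
  induction p with
  | zero =>
    have hl : l.take 1 = [l[0]] := by
      cases l with
      | nil => simp at hp
      | cons a t => simp
    intro a b
    have hF0 : pvF l l[0] = 0 := by
      unfold pvF
      rw [pvIndex?_eq l l[0] 0 hp (by simp) rfl]
      simp
    have hE0 : (0 : Int) ≤ pvE l l[0] := pvE_nonneg l l[0]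
    have ha : a = ((0 : Int), pvE l l[0], ([] : List Int)) := by
      show (pvDedup (l.take 1)).foldl (pvStepA l) (0, 0, []) = _
      rw [hl]
      simp only [pvDedup, List.foldl_cons, List.foldl_nil, List.not_mem_nil, if_false,
        List.nil_append, pvStepA]
      rw [if_pos (by simpa using hF0.le)]
      simp [max_eq_right hE0]
    have henum : PySem.List.enumerate (l.take 1) = [((0 : Int), l[0])] := by
      rw [hl]; simp [PySem.List.enumerate_cons, PySem.List.enumerate_nil]
    have hb : b = pvStepB l ([], 0, 0) ((0 : Int), l[0]) := by
      show (PySem.List.enumerate (l.take 1)).foldl (pvStepB l) ([], 0, 0) = _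
      rw [henum]; simp
    rw [ha, hb]
    have hub0 := pvE_lt l l[0] (List.getElem_mem hp)
    simp only [pvStepB, max_eq_right hE0]
    by_cases h0 : (0 : Int) = pvE l l[0]
    · rw [if_pos h0]
      refine ⟨by simp <;> omega, ?_, by simp <;> omega, Or.inl ⟨by simp <;> omega, by simp, by simp <;> omega⟩⟩
      intro c hc
      rw [hl] at hc; simp at hc; subst hc; simp <;> omega
    · rw [if_neg h0]
      refine ⟨by simp, ?_, by simp <;> omega, Or.inr ⟨by simp <;> omega, by simp, by simp⟩⟩
      intro c hc
      rw [hl] at hc; simp at hc; subst hc; simp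
  | succ p ih =>
    have hpn : p < l.length := Nat.lt_of_succ_lt hp
    specialize ih hpn
    intro a b
    set c := l[p+1] with hc
    have htake : l.take (p+2) = l.take (p+1) ++ [c] := by
      rw [List.take_add_one]
      congr 1
      rw [List.getElem?_eq_getElem hp]
      rfl
    have hlen : (l.take (p+1)).length = p + 1 := by
      rw [List.length_take]; omega
    have henum : PySem.List.enumerate (l.take (p+2))
        = PySem.List.enumerate (l.take (p+1)) ++ [(((p : Int) + 1), c)] := by
      rw [htake, PySem.List.enumerate_append]
      rw [hlen]
      simp [PySem.List.enumerate_cons, PySem.List.enumerate_nil]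
    have hEc : ((p : Int) + 1) ≤ pvE l c := by
      have := pvE_ge l (p+1) hp
      push_cast at this ⊢; omega
    obtain ⟨ihj, ihall, ihub, ihd⟩ := ih
    set a0 := (pvDedup (l.take (p+1))).foldl (pvStepA l) ((0 : Int), (0 : Int), ([] : List Int)) with ha0
    set b0 := (PySem.List.enumerate (l.take (p+1))).foldl (pvStepB l) (([] : List Int), (0 : Int), (0 : Int)) with hb0
    have hbstep : b = pvStepB l b0 (((p : Int) + 1), c) := by
      show (PySem.List.enumerate (l.take (p+2))).foldl (pvStepB l) ([], 0, 0) = _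
      rw [henum, List.foldl_append, List.foldl_cons, List.foldl_nil]
    have hub1 : pvE l c ≤ (l.length : Int) - 1 := pvE_lt l c (by rw [hc]; exact List.getElem_mem hp)
    have hall2 : ∀ c' ∈ l.take (p+2), pvE l c' ≤ max b0.2.2 (pvE l c) := by
      intro c' hc'
      rw [htake] at hc'
      rcases List.mem_append.mp hc' with h | h
      · exact le_trans (ihall c' h) (le_max_left _ _)
      · simp at h; subst h; exact le_max_right _ _
    rcases ihd with ⟨hpe, hst, hres⟩ | ⟨hpe, hst, hres⟩
    · -- B cut at p: the next character is fresh and A cuts as it processes it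
      have hcnot : c ∉ l.take (p+1) := fun hmem => by have := ihall c hmem; omega
      have hFc : pvF l c = (p : Int) + 1 := by
        unfold pvF
        rw [pvIndex?_eq l c (p+1) hp hcnot rfl]
        simp <;> omega
      have ha' : a = (((p : Int) + 1), pvE l c, b0.1) := by
        show (pvDedup (l.take (p+2))).foldl (pvStepA l) (0, 0, []) = _
        rw [htake, pvDedup_append, if_neg hcnot,
          List.foldl_append, List.foldl_cons, List.foldl_nil, ← ha0]
        unfold pvStepA
        rw [if_neg (by rw [hFc, ihj]; omega), hFc, hres, ihj, ← hpe]
      have hmax : max b0.2.2 (pvE l c) = pvE l c := max_eq_right (by omega)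
      rw [ha', hbstep]
      unfold pvStepB
      rw [hmax]
      by_cases he : ((p : Int) + 1) = pvE l c
      · rw [if_pos he]
        refine ⟨rfl, by simpa [hmax] using hall2, by simpa using hub1,
          Or.inl ⟨by push_cast; omega, by push_cast; omega, ?_⟩⟩
        simp only
        rw [hst, ← he]
        push_cast
        rfl
      · rw [if_neg he]
        exact ⟨rfl, by simpa [hmax] using hall2, by simpa using hub1,
          Or.inr ⟨by push_cast; omega, by rw [hst], rfl⟩⟩
    · -- no cut at p: A and B march in lock step
      by_cases hcin : c ∈ l.take (p+1)
      · -- repeated character: A's merge loop does not move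
        have ha' : a = a0 := by
          show (pvDedup (l.take (p+2))).foldl (pvStepA l) (0, 0, []) = _
          rw [htake, pvDedup_append, if_pos hcin, ← ha0]
        have hmax : max b0.2.2 (pvE l c) = b0.2.2 := max_eq_left (ihall c hcin)
        rw [ha', hbstep]
        unfold pvStepB
        rw [hmax]
        by_cases he : ((p : Int) + 1) = b0.2.2
        · rw [if_pos he]
          refine ⟨by rw [ihj], by simpa [hmax] using hall2, by simpa using ihub,
            Or.inl ⟨by push_cast; omega, by push_cast; omega, ?_⟩⟩
          simp only
          rw [hres, hst, ← he]
          push_cast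
          rfl
        · rw [if_neg he]
          exact ⟨by rw [ihj], by simpa [hmax] using hall2, by simpa using ihub,
            Or.inr ⟨by push_cast; omega, hst, hres⟩⟩
      · -- fresh character inside the current segment: both extend the reach
        have hFc : pvF l c = (p : Int) + 1 := by
          unfold pvF
          rw [pvIndex?_eq l c (p+1) hp hcin rfl]
          simp <;> omega
        have ha' : a = (a0.1, max b0.2.2 (pvE l c), a0.2.2) := by
          show (pvDedup (l.take (p+2))).foldl (pvStepA l) (0, 0, []) = _
          rw [htake, pvDedup_append, if_neg hcin,
            List.foldl_append, List.foldl_cons, List.foldl_nil, ← ha0]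
          unfold pvStepA
          rw [if_pos (by rw [hFc, ihj]; omega), ihj]
        have hub2 : max b0.2.2 (pvE l c) ≤ (l.length : Int) - 1 := max_le ihub hub1
        rw [ha', hbstep]
        unfold pvStepB
        by_cases he : ((p : Int) + 1) = max b0.2.2 (pvE l c)
        · rw [if_pos he]
          refine ⟨rfl, hall2, hub2,
            Or.inl ⟨by push_cast; omega, by push_cast; omega, ?_⟩⟩
          simp only
          rw [hres, hst, ← he]
          push_cast
          rfl
        · rw [if_neg he]
          have : ((p : Int) + 1) ≤ max b0.2.2 (pvE l c) := le_trans (by omega) (le_max_left _ _)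
          exact ⟨rfl, hall2, hub2, Or.inr ⟨lt_of_le_of_ne this he, hst, hres⟩⟩

theorem pvLast?_isSome (l : List Char) (c : Char) (hc : c ∈ l) : (pvLast? l c).isSome := by
  obtain ⟨k, hk, hck⟩ := List.getElem_of_mem hc
  obtain ⟨m, hm, _⟩ := pvLast?_ge l c k hk hck
  simp [hm]

theorem pvLastD (l : List Char) (c : Char) :
    ((PySem.List.enumerate l).foldl
        (fun (d : PySem.Dict Char Int) ic => d.insert ic.2 ic.1) PySem.Dict.empty).get? c
      = (pvLast? l c).map (fun k => (k : Int)) := by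
  induction l using List.reverseRecOn with
  | nil => simp [PySem.List.enumerate, pvLast?, PySem.Dict.get?_empty]
  | append_singleton t x ih =>
    have henum : PySem.List.enumerate (t ++ [x]) = PySem.List.enumerate t ++ [((t.length : Int), x)] := by
      rw [PySem.List.enumerate_append]
      simp [PySem.List.enumerate_cons, PySem.List.enumerate_nil]
    rw [henum, List.foldl_append, List.foldl_cons, List.foldl_nil,
      PySem.Dict.get?_insert, ih, pvLast?_append]
    by_cases hc : c = x
    · subst hc; simp
    · simp [hc, Ne.symm hc]

theorem pvEq (S : String) : solve S = solve_alt S := by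
  unfold solve solve_alt
  set l := S.toList with hlS
  by_cases hl : l = []
  · simp [hl]
  · simp only [hl, if_false]
    have hn : 0 < l.length := List.length_pos_iff.mpr hl
    -- A's first pass is the enumerate fold of pvStep1
    have h1 : (PySem.List.pyRange 0 (l.length : Int) 1).foldl
        (fun (st : PySem.Dict Char Int × PySem.Dict Char Int × List Char) i =>
          let c := PySem.List.pyGetD l i ' '
          if st.1.contains c = false then
            (st.1.insert c i, st.2.1.insert c i, st.2.2 ++ [c])
          else
            (st.1, st.2.1.insert c i, st.2.2))
        (PySem.Dict.empty, PySem.Dict.empty, [])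
        = (PySem.List.enumerate l).foldl pvStep1 (PySem.Dict.empty, PySem.Dict.empty, []) := by
      rw [PySem.List.enumerate_eq_map_pyRange l ' ', List.foldl_map]
      rfl
    rw [h1]
    obtain ⟨hS, hE, hO⟩ := pvPass1 l
    set r := (PySem.List.enumerate l).foldl pvStep1 (PySem.Dict.empty, PySem.Dict.empty, []) with hrdef
    -- dict lookups are pvF / pvE on the elements actually traversed
    have hgetS : ∀ c ∈ l, r.1.getD c 0 = pvF l c := by
      intro c hc
      obtain ⟨k, hk⟩ := Option.isSome_iff_exists.mp ((PySem.List.index?_isSome_iff l c).mpr hc)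
      rw [PySem.Dict.getD_eq_get?_getD, hS c, pvF, hk]
      simp
    have hgetE : ∀ c ∈ l, r.2.1.getD c 0 = pvE l c := by
      intro c hc
      obtain ⟨k, hk⟩ := Option.isSome_iff_exists.mp (pvLast?_isSome l c hc)
      rw [PySem.Dict.getD_eq_get?_getD, hE c, pvE, hk]
      simp
    have h2 : r.2.2.foldl
        (fun (st : Int × Int × List Int) c =>
          if r.1.getD c 0 ≤ st.2.1 then
            (st.1, max st.2.1 (r.2.1.getD c 0), st.2.2)
          else
            (r.1.getD c 0, r.2.1.getD c 0, st.2.2 ++ [st.2.1 - st.1 + 1]))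
        (0, 0, [])
        = (pvDedup l).foldl (pvStepA l) (0, 0, []) := by
      rw [hO]
      apply PySem.List.foldl_congr_mem
      intro acc c hc
      have hcl : c ∈ l := (pvDedup_mem l c).mp hc
      rw [hgetS c hcl, hgetE c hcl]
      rfl
    rw [h2]
    -- B's dict lookups are pvE on the traversed pairs
    have h3 : (PySem.List.enumerate l).foldl
        (fun (st : List Int × Int × Int) ic =>
          let en := max st.2.2
            (((PySem.List.enumerate l).foldl
              (fun (d : PySem.Dict Char Int) ic => d.insert ic.2 ic.1) PySem.Dict.empty).getD ic.2 0)
          if ic.1 = en then (st.1 ++ [en - st.2.1 + 1], ic.1 + 1, en)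
          else (st.1, st.2.1, en))
        ([], 0, 0)
        = (PySem.List.enumerate l).foldl (pvStepB l) ([], 0, 0) := by
      apply PySem.List.foldl_congr_mem
      intro acc ic hic
      obtain ⟨k, hk, rfl⟩ := (PySem.List.mem_enumerate_iff l 0 ic).mp hic
      have hcl : l[k] ∈ l := List.getElem_mem hk
      obtain ⟨m, hm⟩ := Option.isSome_iff_exists.mp (pvLast?_isSome l l[k] hcl)
      show _ = pvStepB l acc _
      unfold pvStepB
      rw [PySem.Dict.getD_eq_get?_getD, pvLastD l, pvE, hm]
      simp
    rw [h3]
    -- instantiate the invariant at the last position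
    have hmain := pvMain l (l.length - 1) (by omega)
    rw [show l.length - 1 + 1 = l.length from by omega, List.take_length] at hmain
    obtain ⟨hj, _, hub, hdisj⟩ := hmain
    rcases hdisj with ⟨hpe, _, hres⟩ | ⟨hpe, _, _⟩
    · rw [hres, hj, ← hpe]
    · exfalso
      have : ((l.length - 1 : Nat) : Int) = (l.length : Int) - 1 := by
        push_cast [Nat.cast_sub hn]; ring
      omega

-- ===== VERDICT (by name: the statement is the Claim_ definition above) =====
theorem solve_spec : Claim_equal_solve := by
  intro S _
  unfold Spec_solve
  exact pvEq S
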